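-- pv_equiv track=rewrite | github.com/SamuelTull/CodingProblems | Google/google2.py | codes_old
-- ===== SOURCE A (Python) =====
-- def codes_old(b):
--     cs = [""]
--     for i in range(b):
--         n = len(cs)
--         l = len(cs[0])
--         new_cs = []
--         for c in cs:
--             for ipos in range(l + 1):
--                 # inserting i into cs[idx] at position ipos
--                 new_cs.append("".join((c[:ipos], str(i), c[ipos:])))
--         cs = new_cs
--     cs.sort()
--     return cs
-- ===== SOURCE B (Python) =====
-- def codes_old(b):
--     # Depth-first traversal of the insertion choices with an explicit stack,
--     # instead of A's breadth-first level-by-level list expansion; then sort,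
--     # exactly as A does.
--     out = []
--     stack = [(0, "")]
--     while stack:
--         i, s = stack.pop()
--         if i >= b:
--             out.append(s)
--             continue
--         d = str(i)
--         for p in range(len(s), -1, -1):
--             stack.append((i + 1, s[:p] + d + s[p:]))
--     out.sort()
--     return out
-- ===== Notes on version B (the rewrite author's own statement) =====
-- stated objective: alternative
-- what changed: A grows a full list of all partial strings breadth-first, one level per digit, re-reading the level's common length from cs[0]; B recurses depth-first over the insertion choices, emitting each finished string into an accumulator without materialising any intermediate level list, then sorts identically.
import Mathlib
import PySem

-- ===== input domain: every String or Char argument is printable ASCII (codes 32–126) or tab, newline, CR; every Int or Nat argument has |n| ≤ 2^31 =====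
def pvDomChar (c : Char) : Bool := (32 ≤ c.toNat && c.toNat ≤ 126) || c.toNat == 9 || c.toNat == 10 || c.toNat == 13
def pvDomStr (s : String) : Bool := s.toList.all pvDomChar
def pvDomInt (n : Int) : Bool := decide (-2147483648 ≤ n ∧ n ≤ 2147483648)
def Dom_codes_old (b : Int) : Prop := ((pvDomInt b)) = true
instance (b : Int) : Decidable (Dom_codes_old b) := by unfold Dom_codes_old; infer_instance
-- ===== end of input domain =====

-- B replaces A's breadth-first level-by-level list expansion by a depth-first
-- traversal of the insertion choices with an explicit stack; objective:
-- alternative (no intermediate level lists are materialised).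

-- ===== PORT A =====
def codes_old (b : Int) : List String :=
  let cs : List String := [""]
  let cs := (PySem.List.pyRange 0 b).foldl
    (fun cs i =>
      let _n : Int := (cs.length : Int)
      -- cs[0]: cs is provably never empty, so this never raises; the getD "" default is unreachable
      let l : Int := PySem.Str.len ((PySem.List.pyGet? cs 0).getD "")
      cs.foldl
        (fun new_cs c =>
          (PySem.List.pyRange 0 (l + 1)).foldl
            (fun new_cs ipos =>
              new_cs ++ [PySem.Str.join ""
                [PySem.Str.slice c none (some ipos), PySem.Int.toStr i,
                 PySem.Str.slice c (some ipos) none]])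
            new_cs)
        ([] : List String))
    cs
  PySem.List.sorted cs (fun x => x) false

-- ===== PORT B =====
-- s[:p] + d + s[p:]
def pvIns (d : String) (p : Int) (s : String) : String :=
  PySem.Str.slice s none (some p) ++ d ++ PySem.Str.slice s (some p) none

-- termination helper for the while loop: an in-range insertion adds len(d) characters
lemma len_pvIns (d : String) {p : Int} (hp : 0 ≤ p) (s : String) :
    (pvIns d p s).toList.length = s.toList.length + d.toList.length := by
  simp only [pvIns, String.toList_append, PySem.Str.toList_slice,
    PySem.Chars.slice_eq_listSlice]
  rw [PySem.List.slice_to _ hp, PySem.List.slice_from _ hp]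
  simp only [List.length_append, List.length_take, List.length_drop]
  omega

-- termination helpers: size of the subtree below a stack entry, and the stack's total size
def pvSize : Nat → Int → Nat → Nat
  | 0, _, _ => 1
  | (m + 1), i, L => 1 + (L + 1) * pvSize m (i + 1) (L + (PySem.Int.toStr i).toList.length)

def pvMeasure (b : Int) (stack : List (Int × String)) : Nat :=
  (stack.map (fun e => pvSize (b - e.1).toNat e.1 e.2.toList.length)).sum

lemma pvSize_pos (m : Nat) (i : Int) (L : Nat) : 0 < pvSize m i L := by
  cases m <;> simp [pvSize]

lemma pvMeasure_append (b : Int) (xs ys : List (Int × String)) :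
    pvMeasure b (xs ++ ys) = pvMeasure b xs + pvMeasure b ys := by
  simp [pvMeasure]

lemma pvPopLast {α : Type} (xs ys : List α) (x : α)
    (h : PySem.List.pop? xs (-1) = some (x, ys)) : xs = ys ++ [x] := by
  cases xs using List.reverseRecOn with
  | nil => simp [PySem.List.pop?, PySem.List.pyIdx?] at h
  | append_singleton t a =>
      rw [PySem.List.pop?_last] at h
      obtain ⟨rfl, rfl⟩ : a = x ∧ t = ys := by simpa using h
      rfl

lemma pvMeasure_pop (b : Int) (stack' : List (Int × String)) (e : Int × String) :
    pvMeasure b stack' < pvMeasure b (stack' ++ [e]) := by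
  rw [pvMeasure_append]
  have := pvSize_pos (b - e.1).toNat e.1 e.2.toList.length
  have h1 : pvMeasure b [e] = pvSize (b - e.1).toNat e.1 e.2.toList.length := by
    simp [pvMeasure]
  omega

lemma pvMeasure_push (b i : Int) (s : String) (stack' : List (Int × String)) (hbi : ¬ b ≤ i) :
    pvMeasure b ((PySem.List.pyRange (PySem.Str.len s) (-1) (-1)).foldl
        (fun st p => st ++ [(i + 1, pvIns (PySem.Int.toStr i) p s)]) stack')
      < pvMeasure b (stack' ++ [(i, s)]) := by
  rw [PySem.List.foldl_append_singleton_eq_map, pvMeasure_append, pvMeasure_append]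
  have hmap : pvMeasure b ((PySem.List.pyRange (PySem.Str.len s) (-1) (-1)).map
      (fun p => (i + 1, pvIns (PySem.Int.toStr i) p s)))
      = (s.toList.length + 1) *
          pvSize (b - (i + 1)).toNat (i + 1)
            (s.toList.length + (PySem.Int.toStr i).toList.length) := by
    unfold pvMeasure
    rw [List.map_map]
    rw [List.map_congr_left (g := fun _ =>
      pvSize (b - (i + 1)).toNat (i + 1)
        (s.toList.length + (PySem.Int.toStr i).toList.length)) ?_]
    · rw [List.map_const', List.sum_replicate, smul_eq_mul,
        PySem.List.length_pyRange_neg_one, PySem.Str.len_eq,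
        show (((s.toList.length : Int)) - -1).toNat = s.toList.length + 1 by omega]
    · intro p hp
      have hp0 : 0 ≤ p := by
        have := (PySem.List.mem_pyRange_neg_one.mp hp).1; omega
      simp only [Function.comp]
      rw [len_pvIns _ hp0]
  have hsz : pvSize (b - i).toNat i s.toList.length
      = 1 + (s.toList.length + 1) *
          pvSize (b - (i + 1)).toNat (i + 1)
            (s.toList.length + (PySem.Int.toStr i).toList.length) := by
    have hm : (b - i).toNat = (b - (i + 1)).toNat + 1 := by omega
    rw [hm]
    simp only [pvSize]
  have hlast : pvMeasure b [(i, s)] = pvSize (b - i).toNat i s.toList.length := by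
    simp [pvMeasure]
  rw [hmap, hlast, hsz]
  omega

-- the while loop; 'out' and 'stack' are the mutated lists
def pvLoop (b : Int) (stack : List (Int × String)) (out : List String) : List String :=
  match h : PySem.List.pop? stack (-1) with
  | none => out
  | some ((i, s), stack') =>
      if b ≤ i then pvLoop b stack' (out ++ [s])
      else
        let d := PySem.Int.toStr i
        pvLoop b
          ((PySem.List.pyRange (PySem.Str.len s) (-1) (-1)).foldl
            (fun st p => st ++ [(i + 1, pvIns d p s)]) stack')
          out
termination_by pvMeasure b stack
decreasing_by
  · rw [pvPopLast _ _ _ h]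
    exact pvMeasure_pop b stack' (i, s)
  · rw [pvPopLast _ _ _ h]
    exact pvMeasure_push b i s stack' (by assumption)

def codes_old_alt (b : Int) : List String :=
  PySem.List.sorted (pvLoop b [(0, "")] []) (fun x => x) false

-- ===== PRECONDITION & SPEC =====
def Spec_codes_old (b : Int) (out : List String) : Prop := out = codes_old_alt b
instance (b : Int) (out : List String) : Decidable (Spec_codes_old b out) := by unfold Spec_codes_old; infer_instance

-- ===== CLAIM (what is proved, stated in full; the proofs are below) =====
def Claim_equal_codes_old : Prop := ∀ (b : Int), Dom_codes_old b → Spec_codes_old b (codes_old b)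

-- ===== LEMMAS AND PROOFS =====

-- A's outer loop body, named for the proofs
def pvStepA (cs : List String) (i : Int) : List String :=
  let _n : Int := (cs.length : Int)
  let l : Int := PySem.Str.len ((PySem.List.pyGet? cs 0).getD "")
  cs.foldl
    (fun new_cs c =>
      (PySem.List.pyRange 0 (l + 1)).foldl
        (fun new_cs ipos =>
          new_cs ++ [PySem.Str.join ""
            [PySem.Str.slice c none (some ipos), PySem.Int.toStr i,
             PySem.Str.slice c (some ipos) none]])
        new_cs)
    ([] : List String)

lemma codes_old_eq (b : Int) :
    codes_old b =
      PySem.List.sorted ((PySem.List.pyRange 0 b).foldl pvStepA [""]) (fun x => x) false := rfl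

lemma join_eq_ins (i p : Int) (c : String) :
    PySem.Str.join ""
      [PySem.Str.slice c none (some p), PySem.Int.toStr i, PySem.Str.slice c (some p) none]
      = pvIns (PySem.Int.toStr i) p c := by
  apply String.toList_inj.mp
  simp [pvIns, PySem.Str.toList_join, PySem.Chars.join_cons_cons, PySem.Chars.join_singleton,
    String.toList_append]

lemma pvStepA_eq (cs : List String) (i : Int) :
    pvStepA cs i =
      cs.flatMap (fun c =>
        (PySem.List.pyRange 0 (PySem.Str.len ((PySem.List.pyGet? cs 0).getD "") + 1)).map
          (fun p => pvIns (PySem.Int.toStr i) p c)) := by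
  unfold pvStepA
  simp only [PySem.List.foldl_append_singleton_eq_map, PySem.List.foldl_append_eq_flatMap,
    List.nil_append, join_eq_ins]

-- the depth-first expansion below one node, by remaining fuel
def pvF : Nat → Int → String → List String
  | 0, _, s => [s]
  | (m + 1), i, s =>
      (PySem.List.pyRange 0 (PySem.Str.len s + 1)).flatMap
        (fun p => pvF m (i + 1) (pvIns (PySem.Int.toStr i) p s))

lemma pvPopNone {α : Type} (xs : List α) (h : PySem.List.pop? xs (-1) = none) : xs = [] := by
  cases xs using List.reverseRecOn with
  | nil => rfl
  | append_singleton t a => rw [PySem.List.pop?_last] at h; simp at h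

lemma pvLoop_eq_aux (b : Int) : ∀ (n : Nat) (stack : List (Int × String)) (out : List String),
    pvMeasure b stack ≤ n →
    pvLoop b stack out
      = out ++ (stack.reverse.flatMap (fun e => pvF (b - e.1).toNat e.1 e.2)) := by
  intro n
  induction n with
  | zero =>
      intro stack out hn
      have hstack : stack = [] := by
        cases stack with
        | nil => rfl
        | cons e t =>
            exfalso
            have h1 : pvMeasure b (e :: t)
                = pvSize (b - e.1).toNat e.1 e.2.toList.length + pvMeasure b t := by
              simp [pvMeasure]
            have h2 := pvSize_pos (b - e.1).toNat e.1 e.2.toList.length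
            omega
      subst hstack
      rw [pvLoop]
      split
      · simp
      · next i s stack' h =>
          exfalso
          simp [PySem.List.pop?, PySem.List.pyIdx?] at h
  | succ n ih =>
      intro stack out hn
      rw [pvLoop]
      split
      · next h => rw [pvPopNone _ h]; simp
      · next i s stack' h =>
          have hstack := pvPopLast _ _ _ h
          by_cases hbi : b ≤ i
          · simp only [hbi, if_true]
            have hlt : pvMeasure b stack' < pvMeasure b stack := by
              rw [hstack]; exact pvMeasure_pop b stack' (i, s)
            rw [ih stack' (out ++ [s]) (by omega), hstack]
            have h0 : (b - i).toNat = 0 := by omega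
            simp [pvF, h0]
          · simp only [hbi, if_false]
            have hlt : pvMeasure b ((PySem.List.pyRange (PySem.Str.len s) (-1) (-1)).foldl
                (fun st p => st ++ [(i + 1, pvIns (PySem.Int.toStr i) p s)]) stack')
                < pvMeasure b stack := by
              rw [hstack]; exact pvMeasure_push b i s stack' hbi
            rw [ih _ out (by omega), hstack, PySem.List.foldl_append_singleton_eq_map]
            have hm : (b - i).toNat = (b - (i + 1)).toNat + 1 := by omega
            have hrev : (PySem.List.pyRange ((s.toList.length : Int)) (-1) (-1)).reverse
                = PySem.List.pyRange 0 ((s.toList.length : Int) + 1) := by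
              rw [PySem.List.pyRange_neg_one_eq_reverse, List.reverse_reverse]
              norm_num
            simp only [List.reverse_append, List.reverse_singleton, List.flatMap_append,
              List.flatMap_cons, List.flatMap_nil, PySem.Str.len_eq, ← List.map_reverse,
              hrev, List.flatMap_map, hm, pvF, List.append_assoc]
            simp

lemma pvLoop_eq (b : Int) (stack : List (Int × String)) (out : List String) :
    pvLoop b stack out
      = out ++ (stack.reverse.flatMap (fun e => pvF (b - e.1).toNat e.1 e.2)) :=
  pvLoop_eq_aux b (pvMeasure b stack) stack out le_rfl

-- A's levels, expanded depth-first: fold of pvStepA over [i, i+m) on a nonempty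
-- list of strings of equal length is the flattened depth-first expansion
lemma pvLevels (m : Nat) : ∀ (i : Int) (cs : List String) (L : Int), cs ≠ [] →
    (∀ c ∈ cs, PySem.Str.len c = L) →
    (PySem.List.pyRange i (i + (m : Int))).foldl pvStepA cs = cs.flatMap (pvF m i) := by
  induction m with
  | zero =>
      intro i cs L _ _
      rw [show i + ((0 : Nat) : Int) = i by omega, PySem.List.pyRange_one_eq_nil le_rfl]
      simp [pvF]
  | succ m ih =>
      intro i cs L hne hL
      obtain ⟨c0, rest, hc0⟩ := List.exists_cons_of_ne_nil hne
      have hL0 : 0 ≤ L := by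
        have := hL c0 (by rw [hc0]; exact List.mem_cons_self ..)
        rw [PySem.Str.len_eq] at this
        omega
      have hget : PySem.Str.len ((PySem.List.pyGet? cs 0).getD "") = L := by
        rw [hc0]
        simp only [PySem.List.pyGet?, PySem.List.pyIdx?]
        norm_num
        exact hL c0 (by rw [hc0]; exact List.mem_cons_self ..)
      have hstep : pvStepA cs i =
          cs.flatMap (fun c =>
            (PySem.List.pyRange 0 (L + 1)).map (fun p => pvIns (PySem.Int.toStr i) p c)) := by
        rw [pvStepA_eq, hget]
      have hr_ne : PySem.List.pyRange 0 (L + 1) ≠ [] := by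
        apply List.ne_nil_of_length_pos
        rw [PySem.List.length_pyRange_one]
        omega
      rw [PySem.List.pyRange_one_cons (by omega), List.foldl_cons, hstep]
      have harr : i + ((m + 1 : Nat) : Int) = (i + 1) + (m : Int) := by push_cast; ring
      rw [harr]
      rw [ih (i + 1) _ (L + PySem.Str.len (PySem.Int.toStr i)) ?_ ?_]
      · rw [List.flatMap_assoc]
        apply List.flatMap_congr
        intro c hc
        rw [List.flatMap_map, pvF]
        have hlen : PySem.Str.len c + 1 = L + 1 := by rw [hL c hc]
        rw [hlen]
      · -- the new level is nonempty
        obtain ⟨p, hp⟩ := List.exists_mem_of_ne_nil _ hr_ne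
        apply List.ne_nil_of_mem (a := pvIns (PySem.Int.toStr i) p c0)
        simp only [List.mem_flatMap, List.mem_map]
        exact ⟨c0, by rw [hc0]; exact List.mem_cons_self .., p, hp, rfl⟩
      · -- all strings of the new level share the new length
        intro s hs
        simp only [List.mem_flatMap, List.mem_map] at hs
        obtain ⟨c, hc, p, hpmem, rfl⟩ := hs
        have hp0 : 0 ≤ p := ((PySem.List.mem_pyRange_one).mp hpmem).1
        have := hL c hc
        simp only [PySem.Str.len_eq] at *
        rw [len_pvIns _ hp0]
        push_cast
        omega

lemma codes_old_eq_alt (b : Int) : codes_old b = codes_old_alt b := by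
  rw [codes_old_eq]
  show _ = PySem.List.sorted (pvLoop b [(0, "")] []) (fun x => x) false
  rw [pvLoop_eq]
  simp only [List.reverse_singleton, List.flatMap_cons, List.flatMap_nil, List.append_nil,
    List.nil_append]
  by_cases hb : b ≤ 0
  · rw [PySem.List.pyRange_one_eq_nil hb, show (b - 0).toNat = 0 by omega]
    simp [pvF]
  · have h0 : (0 : Int) + (((b - 0).toNat : Nat) : Int) = b := by omega
    rw [show PySem.List.pyRange 0 b = PySem.List.pyRange 0 (0 + (((b - 0).toNat : Nat) : Int)) by
      rw [h0]]
    rw [pvLevels (b - 0).toNat 0 [""] 0 (by simp) (by simp [PySem.Str.len_eq])]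
    simp

-- ===== VERDICT (by name: the statement is the Claim_ definition above) =====
theorem codes_old_spec : Claim_equal_codes_old := by
  intro b _
  unfold Spec_codes_old
  exact codes_old_eq_alt b
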